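-- pv_equiv track=rewrite | github.com/jacobvsdanniel/pubmedkb_web | variant_report_json.py | find_CDS_pos
-- ===== SOURCE A (Python) =====
-- def find_CDS_pos(split_var):
--     '''
--     find the position of the nucleotide(s) that affected by the variant
--     '''
--     pos=[]
--     start = 0
--     for j in split_var:
--         if j.isdigit():
--             break
--         else:
--             start += 1
--
--     for i in split_var[start:]:
--         if i.isdigit():
--             pos.append(i)
--         elif i in ['+', '-']:
--             pos.append(i)
--         else:
--             break
--     return ''.join(pos)
-- ===== SOURCE B (Python) =====
-- import re
--
-- def find_CDS_pos(split_var):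
--     m = re.search(r'\d[\d+-]*', split_var)
--     return m.group() if m else ''
-- ===== Notes on version B (the rewrite author's own statement) =====
-- stated objective: idiomatic
-- what changed: Replaces the two hand-written scanning loops (find first digit, then collect digits/+/-) with a single regex search r'\d[\d+-]*' that anchors on the first digit and greedily consumes digits and signs.
import Mathlib
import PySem

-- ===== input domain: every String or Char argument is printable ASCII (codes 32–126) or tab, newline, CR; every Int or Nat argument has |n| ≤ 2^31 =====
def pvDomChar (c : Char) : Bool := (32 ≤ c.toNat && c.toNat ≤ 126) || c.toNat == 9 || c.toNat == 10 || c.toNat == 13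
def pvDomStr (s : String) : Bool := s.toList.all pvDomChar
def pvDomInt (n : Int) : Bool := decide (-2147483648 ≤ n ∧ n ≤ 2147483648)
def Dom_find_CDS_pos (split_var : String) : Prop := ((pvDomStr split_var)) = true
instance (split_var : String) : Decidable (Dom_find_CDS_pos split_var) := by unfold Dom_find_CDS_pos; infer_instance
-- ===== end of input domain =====

-- B replaces A's two hand-written scanning loops with a single regex search (idiomatic, same cost).

-- ===== PORT A =====
-- first loop: count characters until the first digit (break), += 1 otherwise
def pvScanStart : List Char → Nat
  | [] => 0
  | c :: cs => if PySem.Chars.isdigit c then 0 else pvScanStart cs + 1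

-- second loop: append digits and '+'/'-' to pos, break otherwise
def pvScanPos : List Char → List Char
  | [] => []
  | c :: cs =>
    if PySem.Chars.isdigit c then c :: pvScanPos cs
    else if c = '+' ∨ c = '-' then c :: pvScanPos cs
    else []

def find_CDS_pos (split_var : String) : String :=
  let cs := split_var.toList
  let start := pvScanStart cs
  String.mk (pvScanPos (PySem.List.slice cs (some (start : Int)) none))

-- ===== PORT B =====
-- re.search(r'\d[\d+-]*', s): drop to the first digit; no match → ''; else the digit
-- followed by the greedy [\d+-]* tail (exact on the ASCII domain, where \d = isdigit)
def find_CDS_pos_alt (split_var : String) : String :=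
  match split_var.toList.dropWhile (fun c => !(PySem.Chars.isdigit c)) with
  | [] => ""
  | c :: cs =>
    String.mk (c :: cs.takeWhile (fun d => PySem.Chars.isdigit d || d == '+' || d == '-'))

-- ===== PRECONDITION & SPEC =====
def Spec_find_CDS_pos (split_var : String) (out : String) : Prop := out = find_CDS_pos_alt split_var
instance (split_var : String) (out : String) : Decidable (Spec_find_CDS_pos split_var out) := by unfold Spec_find_CDS_pos; infer_instance

-- ===== CLAIM (what is proved, stated in full; the proofs are below) =====
def Claim_equal_find_CDS_pos : Prop := ∀ (split_var : String), Dom_find_CDS_pos split_var → Spec_find_CDS_pos split_var (find_CDS_pos split_var)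

-- ===== LEMMAS AND PROOFS =====

lemma pvScanStart_drop (l : List Char) :
    l.drop (pvScanStart l) = l.dropWhile (fun c => !(PySem.Chars.isdigit c)) := by
  induction l with
  | nil => simp [pvScanStart]
  | cons c cs ih =>
    by_cases h : PySem.Chars.isdigit c = true
    · simp [pvScanStart, List.dropWhile, h]
    · simp [pvScanStart, List.dropWhile, h, ih]

lemma pvScanPos_eq_takeWhile (l : List Char) :
    pvScanPos l = l.takeWhile (fun d => PySem.Chars.isdigit d || d == '+' || d == '-') := by
  induction l with
  | nil => simp [pvScanPos]
  | cons c cs ih =>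
    by_cases h : PySem.Chars.isdigit c = true
    · simp [pvScanPos, List.takeWhile, h, ih]
    · by_cases hp : c = '+' ∨ c = '-'
      · rcases hp with hp | hp <;> subst hp <;>
          simp [pvScanPos, List.takeWhile, h, ih] <;> simp_all
      · push_neg at hp
        have hb : (c == '+' || c == '-') = false := by simp [hp.1, hp.2]
        simp [pvScanPos, List.takeWhile, h, hp.1, hp.2, hb]

-- ===== VERDICT (by name: the statement is the Claim_ definition above) =====
theorem find_CDS_pos_spec : Claim_equal_find_CDS_pos := by
  intro s _
  unfold Spec_find_CDS_pos find_CDS_pos find_CDS_pos_alt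
  simp only [PySem.List.slice_from_natCast, pvScanStart_drop, pvScanPos_eq_takeWhile]
  cases hd : s.toList.dropWhile (fun c => !(PySem.Chars.isdigit c)) with
  | nil => rfl
  | cons c cs =>
    have hne : s.toList.dropWhile (fun c => !(PySem.Chars.isdigit c)) ≠ [] := by simp [hd]
    have h2 := List.head_dropWhile_not (l := s.toList)
      (p := fun c => !(PySem.Chars.isdigit c)) hne
    simp only [hd, List.head_cons] at h2
    simp at h2
    simp [List.takeWhile, h2]
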